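-- pv_equiv track=rewrite | github.com/AzimST/PairingsHaveBeenPosted | main.py | _players_to_seats
-- ===== SOURCE A (Python) =====
-- def _players_to_seats(players):
--     seats = []
--     for i in range(0, len(players), 2):
--         try:
--             seats.append([players[i], players[i + 1]])
--         except IndexError:
--             seats.append([players[i], "BYE"])
--
--     return seats
-- ===== SOURCE B (Python) =====
-- from itertools import zip_longest
--
--
-- def _players_to_seats(players):
--     evens = players[0::2]
--     odds = players[1::2]
--     return [list(pair) for pair in zip_longest(evens, odds, fillvalue="BYE")]
-- ===== Notes on version B (the rewrite author's own statement) =====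
-- stated objective: idiomatic
-- what changed: Replaces the index-stepping loop with try/except IndexError fallback by splitting the list into two strided slices and zipping them with zip_longest(fillvalue='BYE').
import Mathlib
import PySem

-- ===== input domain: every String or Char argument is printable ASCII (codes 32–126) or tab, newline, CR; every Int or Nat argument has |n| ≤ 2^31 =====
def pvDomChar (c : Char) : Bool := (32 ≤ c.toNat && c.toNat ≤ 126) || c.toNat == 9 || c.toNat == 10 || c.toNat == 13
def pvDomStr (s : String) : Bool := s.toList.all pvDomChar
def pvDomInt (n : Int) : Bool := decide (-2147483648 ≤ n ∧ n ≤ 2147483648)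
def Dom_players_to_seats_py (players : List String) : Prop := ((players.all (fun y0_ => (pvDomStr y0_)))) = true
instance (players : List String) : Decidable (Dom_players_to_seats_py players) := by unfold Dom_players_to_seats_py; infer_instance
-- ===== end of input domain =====

-- B replaces A's index-stepping loop with try/except fallback by zipping two strided
-- slices with a BYE fillvalue (idiomatic decomposition; same asymptotic cost).

-- ===== PORT A =====
-- try: seats.append([players[i], players[i+1]]) / except IndexError: seats.append([players[i], "BYE"]).
-- The (none, _) branch is unreachable (i ranges over valid indices); [] there.
def pairTryA (players : List String) (i : Int) : List (List String) :=
  match PySem.List.pyGet? players i, PySem.List.pyGet? players (i + 1) with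
  | some a, some b => [[a, b]]
  | some a, none => [[a, "BYE"]]
  | none, _ => []

def players_to_seats_py (players : List String) : List (List String) :=
  (PySem.List.pyRange 0 (players.length : Int) 2).foldl
    (fun seats i => seats ++ pairTryA players i) []

-- ===== PORT B =====
-- zip_longest(evens, odds, fillvalue="BYE"), each tuple wrapped as a two-element list
def zipLongestBye : List String → List String → List (List String)
  | [], [] => []
  | [], b :: bt => ["BYE", b] :: zipLongestBye [] bt
  | a :: at_, [] => [a, "BYE"] :: zipLongestBye at_ []
  | a :: at_, b :: bt => [a, b] :: zipLongestBye at_ bt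

def players_to_seats_py_alt (players : List String) : List (List String) :=
  let evens := (PySem.List.slice? players (some 0) none 2).getD []
  let odds := (PySem.List.slice? players (some 1) none 2).getD []
  zipLongestBye evens odds

-- ===== PRECONDITION & SPEC =====
def Spec_players_to_seats_py (players : List String) (out : List (List String)) : Prop := out = players_to_seats_py_alt players
instance (players : List String) (out : List (List String)) : Decidable (Spec_players_to_seats_py players out) := by unfold Spec_players_to_seats_py; infer_instance

-- ===== CLAIM (what is proved, stated in full; the proofs are below) =====
def Claim_equal_players_to_seats_py : Prop := ∀ (players : List String), Dom_players_to_seats_py players → Spec_players_to_seats_py players (players_to_seats_py players)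

-- ===== LEMMAS AND PROOFS =====

-- canonical form both ports are reduced to
def pvPairAt (players : List String) (k : Nat) : List String :=
  [players.getD (2 * k) "",
   if 2 * k + 1 < players.length then players.getD (2 * k + 1) "" else "BYE"]

def pvCanon (players : List String) : List (List String) :=
  (List.range ((players.length + 1) / 2)).map (pvPairAt players)

lemma pairTryA_eq (players : List String) (k : Nat) (hk : 2 * k < players.length) :
    pairTryA players ((2 : Int) * (k : Int)) = [pvPairAt players k] := by
  have h1 : ((2 : Int) * (k : Int)) = ((2 * k : Nat) : Int) := by push_cast; ring
  have h2 : ((2 : Int) * (k : Int) + 1) = ((2 * k + 1 : Nat) : Int) := by push_cast; ring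
  unfold pairTryA pvPairAt
  rw [h1, show ((2 * k : Nat) : Int) + 1 = ((2 * k + 1 : Nat) : Int) by push_cast; ring,
    PySem.List.pyGet?_natCast, PySem.List.pyGet?_natCast]
  by_cases hb : 2 * k + 1 < players.length
  · simp [hk, hb, List.getD]
  · have : players[2 * k + 1]? = none := by
      rw [List.getElem?_eq_none_iff]; omega
    simp [hk, hb, List.getD]

lemma A_eq_canon (players : List String) :
    players_to_seats_py players = pvCanon players := by
  unfold players_to_seats_py
  rw [PySem.List.foldl_append_eq_flatMap]
  rw [PySem.List.pyRange_of_pos 0 (players.length : Int) (by norm_num)]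
  rw [List.flatMap_map]
  have hcnt : (if (0 : Int) < (players.length : Int) then
      (((players.length : Int) - 0 + 2 - 1) / 2).toNat else 0) = (players.length + 1) / 2 := by
    split_ifs with h
    · omega
    · omega
  rw [hcnt, List.nil_append]
  unfold pvCanon
  have key : ∀ ys : List Nat, (∀ k ∈ ys, 2 * k < players.length) →
      List.flatMap (fun (k : Nat) => pairTryA players (0 + 2 * (k : Int))) ys
        = ys.map (pvPairAt players) := by
    intro ys hys
    induction ys with
    | nil => simp
    | cons y t ih =>
      simp only [List.map_cons, List.flatMap_cons]
      rw [ih (fun k hk => hys k (List.mem_cons_of_mem _ hk))]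
      have := pairTryA_eq players y (hys y (List.mem_cons_self))
      rw [zero_add, this]
      rfl
  rw [key]
  intro k hk
  rw [List.mem_range] at hk
  omega

-- elements of the two slices
lemma filterMap_some_eq_map {α β : Type} (f : α → Option β) (g : α → β) (l : List α)
    (h : ∀ x ∈ l, f x = some (g x)) : l.filterMap f = l.map g := by
  induction l with
  | nil => simp
  | cons x t ih =>
    rw [List.filterMap_cons, h x List.mem_cons_self, List.map_cons,
      ih (fun y hy => h y (List.mem_cons_of_mem _ hy))]

lemma evens_eq (players : List String) :
    (PySem.List.slice? players (some 0) none 2).getD [] =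
      (List.range ((players.length + 1) / 2)).map (fun k => players.getD (2 * k) "") := by
  unfold PySem.List.slice? PySem.List.sliceIndices
  norm_num
  rw [show (if 0 < players.length then (((players.length : Int) + 2 - 1) / 2).toNat else 0)
      = (players.length + 1) / 2 by split_ifs with h <;> omega]
  apply filterMap_some_eq_map
  intro k hk
  rw [List.mem_range] at hk
  rw [show ((2 : Int) * (k : Int)).toNat = 2 * k by omega]
  rw [List.getElem?_eq_getElem (by omega : 2 * k < players.length)]
  simp

lemma odds_eq (players : List String) :
    (PySem.List.slice? players (some 1) none 2).getD [] =
      (List.range (players.length / 2)).map (fun k => players.getD (2 * k + 1) "") := by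
  rcases Nat.eq_zero_or_pos players.length with h0 | h0
  · rw [List.length_eq_zero_iff] at h0
    subst h0
    decide
  · unfold PySem.List.slice? PySem.List.sliceIndices
    norm_num
    rw [show (min 1 (players.length : Int)) = 1 by omega]
    rw [show (if 1 < players.length then (((players.length : Int) - 1 + 2 - 1) / 2).toNat else 0)
        = players.length / 2 by split_ifs with h <;> omega]
    apply filterMap_some_eq_map
    intro k hk
    rw [List.mem_range] at hk
    rw [show ((1 : Int) + 2 * (k : Int)).toNat = 2 * k + 1 by omega]
    rw [List.getElem?_eq_getElem (by omega : 2 * k + 1 < players.length)]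
    simp

lemma zipLongestBye_length (xs ys : List String) :
    (zipLongestBye xs ys).length = max xs.length ys.length := by
  induction xs generalizing ys with
  | nil =>
    induction ys with
    | nil => simp [zipLongestBye]
    | cons y yt ihy => simp [zipLongestBye, ihy]
  | cons x xt ih =>
    cases ys with
    | nil => simp [zipLongestBye, ih []]
    | cons y yt => simp [zipLongestBye, ih yt]

lemma zipLongestBye_getElem (xs ys : List String) (j : Nat)
    (hj : j < (zipLongestBye xs ys).length) :
    (zipLongestBye xs ys)[j] = [xs.getD j "BYE", ys.getD j "BYE"] := by
  induction xs generalizing ys j with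
  | nil =>
    induction ys generalizing j with
    | nil => simp [zipLongestBye] at hj
    | cons y yt ihy =>
      cases j with
      | zero => simp [zipLongestBye, List.getD]
      | succ n =>
        simp only [zipLongestBye] at hj ⊢
        rw [List.getElem_cons_succ, ihy n (by simpa using hj)]
        simp [List.getD]
  | cons x xt ih =>
    cases ys with
    | nil =>
      cases j with
      | zero => simp [zipLongestBye, List.getD]
      | succ n =>
        simp only [zipLongestBye] at hj ⊢
        rw [List.getElem_cons_succ, ih [] n (by simpa using hj)]
        simp [List.getD]
    | cons y yt =>
      cases j with
      | zero => simp [zipLongestBye, List.getD]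
      | succ n =>
        simp only [zipLongestBye] at hj ⊢
        rw [List.getElem_cons_succ, ih yt n (by simpa using hj)]
        simp [List.getD]

lemma B_eq_canon (players : List String) :
    players_to_seats_py_alt players = pvCanon players := by
  unfold players_to_seats_py_alt
  rw [evens_eq, odds_eq]
  apply List.ext_getElem
  · rw [zipLongestBye_length]
    simp [pvCanon]
    omega
  · intro j h1 h2
    rw [zipLongestBye_getElem]
    unfold pvCanon pvPairAt
    have hj : j < (players.length + 1) / 2 := by
      simpa [pvCanon] using h2
    rw [List.getElem_map, List.getElem_range]
    congr 1
    · rw [List.getD_eq_getElem?_getD, List.getElem?_map,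
        List.getElem?_range (by omega : j < (players.length + 1) / 2)]
      simp
    · congr 1
      rw [List.getD_eq_getElem?_getD, List.getElem?_map]
      by_cases hb : 2 * j + 1 < players.length
      · rw [List.getElem?_range (by omega : j < players.length / 2)]
        simp [hb]
      · rw [List.getElem?_eq_none_iff.mpr (by simp; omega)]
        simp [hb]

-- ===== VERDICT (by name: the statement is the Claim_ definition above) =====
theorem players_to_seats_py_spec : Claim_equal_players_to_seats_py := by
  intro players _
  unfold Spec_players_to_seats_py
  rw [A_eq_canon, B_eq_canon]
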